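-- pv_equiv track=rewrite | github.com/davronMH/Python | lesson-6/homework/script.py | process
-- ===== SOURCE A (Python) =====
-- def process(txt):
--     unli = "aeiouAEIOU"
--     result = ""
--     count = 0
--     delay = False
--
--     for i, ch in enumerate(txt):
--         result += ch
--         count += 1
--
--         if i == len(txt) - 1:
--             continue
--
--         if delay:
--             result += "_"
--             delay = False
--             continue
--
--         if count % 3 == 0:
--             if ch in unli:
--                 delay = True
--             else:
--                 result += "_"
--
--     return result
-- ===== SOURCE B (Python) =====
-- def process(txt):
--     vowels = "aeiouAEIOU"
--     n = len(txt)
--     marks = set()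
--     for p in range(2, n - 1, 3):
--         if txt[p] in vowels:
--             if p + 1 != n - 1:
--                 marks.add(p + 1)
--         else:
--             marks.add(p)
--     return "".join(c + "_" * (i in marks) for i, c in enumerate(txt))
-- ===== Notes on version B (the rewrite author's own statement) =====
-- stated objective: alternative
-- what changed: Replaces the sequential count/delay state machine with arithmetic computation of the trigger positions p = 3k+2 (shifted by one after a vowel, suppressed at the last index), then a single splice pass inserting underscores after the marked indices.
import Mathlib
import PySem

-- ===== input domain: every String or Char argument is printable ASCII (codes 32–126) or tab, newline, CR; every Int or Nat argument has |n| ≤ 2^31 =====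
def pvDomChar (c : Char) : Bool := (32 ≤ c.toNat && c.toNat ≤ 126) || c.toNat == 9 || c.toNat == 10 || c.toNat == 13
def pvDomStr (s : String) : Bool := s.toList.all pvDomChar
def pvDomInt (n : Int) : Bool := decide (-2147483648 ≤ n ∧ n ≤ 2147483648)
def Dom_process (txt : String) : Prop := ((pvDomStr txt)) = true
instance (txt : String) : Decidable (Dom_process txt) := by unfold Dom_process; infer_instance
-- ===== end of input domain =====

-- B replaces A's sequential count/delay state machine by arithmetic computation of the
-- underscore positions (trigger indices 3k+2, shifted by one after a vowel) plus one splice pass.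


-- ===== PORT A =====
def pvVowels : List Char := "aeiouAEIOU".toList

def stepA (n : Int) (st : List Char × Int × Bool) (ic : Int × Char) : List Char × Int × Bool :=
  let result := st.1 ++ [ic.2]
  let count := st.2.1 + 1
  if ic.1 == n - 1 then (result, count, st.2.2)
  else if st.2.2 then (result ++ ['_'], count, false)
  else if PySem.Int.mod count 3 == 0 then
    if pvVowels.contains ic.2 then (result, count, true)
    else (result ++ ['_'], count, false)
  else (result, count, st.2.2)

def process (txt : String) : String :=
  String.ofList (((PySem.List.enumerate txt.toList 0).foldl
      (stepA (txt.toList.length : Int)) ([], 0, false)).1)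

-- ===== PORT B =====
def marksOf (cs : List Char) : PySem.Set Int :=
  (PySem.List.pyRange 2 ((cs.length : Int) - 1) 3).foldl
    (fun m p =>
      if pvVowels.contains (PySem.List.pyGetD cs p ' ') then
        (if p + 1 != (cs.length : Int) - 1 then PySem.Set.add m (p + 1) else m)
      else PySem.Set.add m p)
    PySem.Set.empty

def process_alt (txt : String) : String :=
  String.ofList ((PySem.List.enumerate txt.toList 0).flatMap
    (fun ic => ic.2 :: (if PySem.Set.contains (marksOf txt.toList) ic.1 then ['_'] else [])))

-- ===== PRECONDITION & SPEC =====
def Spec_process (txt : String) (out : String) : Prop := out = process_alt txt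
instance (txt : String) (out : String) : Decidable (Spec_process txt out) := by unfold Spec_process; infer_instance

-- ===== CLAIM (what is proved, stated in full; the proofs are below) =====
def Claim_equal_process : Prop := ∀ (txt : String), Dom_process txt → Spec_process txt (process txt)

-- ===== LEMMAS AND PROOFS =====

-- A's loop, rewritten as a structural recursion carrying the position and the delay flag.
def gA (n : Int) : List Char → Int → Bool → List Char
  | [], _, _ => []
  | c :: rest, j, d =>
    if j == n - 1 then c :: gA n rest (j + 1) d
    else if d then c :: '_' :: gA n rest (j + 1) false
    else if PySem.Int.mod (j + 1) 3 == 0 then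
      if pvVowels.contains c then c :: gA n rest (j + 1) true
      else c :: '_' :: gA n rest (j + 1) false
    else c :: gA n rest (j + 1) d

def dA (n : Int) : List Char → Int → Bool → Bool
  | [], _, d => d
  | c :: rest, j, d =>
    if j == n - 1 then dA n rest (j + 1) d
    else if d then dA n rest (j + 1) false
    else if PySem.Int.mod (j + 1) 3 == 0 then
      (if pvVowels.contains c then dA n rest (j + 1) true else dA n rest (j + 1) false)
    else dA n rest (j + 1) d

lemma foldA (n : Int) : ∀ (l : List Char) (j : Int) (acc : List Char) (d : Bool),
    (PySem.List.enumerate l j).foldl (stepA n) (acc, j, d)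
      = (acc ++ gA n l j d, j + l.length, dA n l j d) := by
  intro l
  induction l with
  | nil => intro j acc d; simp [PySem.List.enumerate_nil, gA, dA]
  | cons c rest ih =>
    intro j acc d
    rw [PySem.List.enumerate_cons, List.foldl_cons]
    by_cases h1 : (j == n - 1) = true
    · rw [show stepA n (acc, j, d) (j, c) = (acc ++ [c], j + 1, d) from by
        simp [stepA, h1], ih]
      simp only [gA, dA]
      simp [h1, List.append_assoc]
      all_goals omega
    · by_cases h2 : d = true
      · rw [show stepA n (acc, j, d) (j, c) = (acc ++ [c] ++ ['_'], j + 1, false) from by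
          simp [stepA, h1, h2], ih]
        simp only [gA, dA]
        simp [h1, h2, List.append_assoc]
        all_goals omega
      · by_cases h3 : (PySem.Int.mod (j + 1) 3 == 0) = true
        · have h3' : (3 : Int) ∣ j + 1 :=
            (PySem.Int.mod_eq_zero_iff_dvd _ _).mp (by simpa using h3)
          by_cases h4 : pvVowels.contains c = true
          · have h4' : c ∈ pvVowels := by simpa using h4
            rw [show stepA n (acc, j, d) (j, c) = (acc ++ [c], j + 1, true) from by
              simp [stepA, h1, h2, h3', h4'], ih]
            simp only [gA, dA]
            simp [h1, h2, h3', h4', List.append_assoc]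
            all_goals omega
          · have h4' : c ∉ pvVowels := by simpa using h4
            rw [show stepA n (acc, j, d) (j, c) = (acc ++ [c] ++ ['_'], j + 1, false) from by
              simp [stepA, h1, h2, h3', h4'], ih]
            simp only [gA, dA]
            simp [h1, h2, h3', h4', List.append_assoc]
            all_goals omega
        · have h3' : ¬ ((3 : Int) ∣ j + 1) := fun h =>
            h3 (by simpa using (PySem.Int.mod_eq_zero_iff_dvd (j + 1) 3).mpr h)
          rw [show stepA n (acc, j, d) (j, c) = (acc ++ [c], j + 1, d) from by
            simp [stepA, h1, h2, h3'], ih]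
          simp only [gA, dA]
          simp [h1, h2, h3', List.append_assoc]
          all_goals omega

def Vw (cs : List Char) (p : Int) : Bool := pvVowels.contains (PySem.List.pyGetD cs p ' ')

lemma mem_foldMarks (cs : List Char) (r : List Int) : ∀ (s : PySem.Set Int) (x : Int),
    x ∈ r.foldl
      (fun m p =>
        if pvVowels.contains (PySem.List.pyGetD cs p ' ') then
          (if p + 1 != (cs.length : Int) - 1 then PySem.Set.add m (p + 1) else m)
        else PySem.Set.add m p) s
    ↔ x ∈ s ∨ ∃ p ∈ r,
        (Vw cs p = true ∧ p + 1 ≠ (cs.length : Int) - 1 ∧ x = p + 1)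
        ∨ (Vw cs p = false ∧ x = p) := by
  induction r with
  | nil => intro s x; simp
  | cons q r ih =>
    intro s x
    rw [List.foldl_cons]
    by_cases hv : pvVowels.contains (PySem.List.pyGetD cs q ' ') = true
    · have hV : Vw cs q = true := hv
      by_cases hne : ((q + 1 : Int) != (cs.length : Int) - 1) = true
      · have hne' : q + 1 ≠ ((cs.length : Int) - 1) := by simpa using hne
        rw [if_pos hv, if_pos hne, ih]
        simp only [PySem.Set.mem_add, List.exists_mem_cons_iff, hV]
        simp [hne']
        all_goals exact or_assoc
      · have hne' : q + 1 = ((cs.length : Int) - 1) := by simpa using hne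
        rw [if_pos hv, if_neg hne, ih]
        simp only [List.exists_mem_cons_iff, hV]
        simp [hne']
    · have hV : Vw cs q = false := by
        unfold Vw; simp only [Bool.not_eq_true] at hv; exact hv
      rw [if_neg hv, ih]
      simp only [PySem.Set.mem_add, List.exists_mem_cons_iff, hV]
      simp
      all_goals exact or_assoc

lemma mem_marksOf (cs : List Char) (x : Int) :
    x ∈ marksOf cs ↔ ∃ p : Int, 2 ≤ p ∧ p < (cs.length : Int) - 1 ∧ (3 : Int) ∣ p - 2 ∧
      ((Vw cs p = true ∧ p + 1 ≠ (cs.length : Int) - 1 ∧ x = p + 1)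
        ∨ (Vw cs p = false ∧ x = p)) := by
  unfold marksOf
  rw [mem_foldMarks]
  constructor
  · rintro (h | ⟨p, hp, hc⟩)
    · simp [PySem.Set.empty] at h
    · rcases (PySem.List.mem_pyRange_iff_of_pos (by norm_num) p).mp hp with ⟨h1, h2, h3⟩
      exact ⟨p, h1, h2, h3, hc⟩
  · rintro ⟨p, h1, h2, h3, hc⟩
    exact Or.inr ⟨p, (PySem.List.mem_pyRange_iff_of_pos (by norm_num) p).mpr ⟨h1, h2, h3⟩, hc⟩

lemma contains_marksOf (cs : List Char) (x : Int) :
    PySem.Set.contains (marksOf cs) x = true ↔ x ∈ marksOf cs := by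
  simp [PySem.Set.contains]

-- the main induction: A's recursion equals B's splice pass, position by position
lemma mainA (cs : List Char) : ∀ (l : List Char) (j : Nat) (d : Bool),
    cs.drop j = l →
    (d = true ↔ (0 < j ∧ j < cs.length ∧ 3 ∣ j ∧ Vw cs ((j : Int) - 1) = true)) →
    gA (cs.length : Int) l (j : Int) d
      = (PySem.List.enumerate l (j : Int)).flatMap
          (fun ic => ic.2 :: (if PySem.Set.contains (marksOf cs) ic.1 then ['_'] else [])) := by
  intro l
  induction l with
  | nil => intro j d _ _; simp [gA, PySem.List.enumerate_nil]
  | cons c rest ih =>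
    intro j d hdrop hinv
    have hj : j < cs.length := by
      by_contra h
      rw [List.drop_eq_nil_of_le (Nat.le_of_not_lt h)] at hdrop
      exact absurd hdrop (by simp)
    have hlen : cs.length - j = rest.length + 1 := by
      have h := congrArg List.length hdrop
      rw [List.length_drop] at h
      simpa using h
    have hrest : cs.drop (j + 1) = rest := by
      have h : (cs.drop j).tail = rest := by rw [hdrop]; rfl
      rw [← h, List.tail_drop]
    have hget : cs[j]? = some c := by
      have h : (cs.drop j).head? = some c := by rw [hdrop]; rfl
      rwa [List.head?_drop] at h
    have hVj : Vw cs (j : Int) = pvVowels.contains c := by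
      simp [Vw, PySem.List.pyGetD_natCast, List.getD_eq_getElem?_getD, hget]
    rw [PySem.List.enumerate_cons, List.flatMap_cons]
    by_cases hlast : rest = []
    · subst hlast
      simp only [List.length_nil] at hlen
      have hjn : (j : Int) = (cs.length : Int) - 1 := by omega
      have hnm : PySem.Set.contains (marksOf cs) (j : Int) = false := by
        rw [Bool.eq_false_iff, Ne, contains_marksOf, mem_marksOf]
        rintro ⟨p, h1, h2, h3, (⟨_, hne, hx⟩ | ⟨_, hx⟩)⟩ <;> omega
      rw [gA, if_pos (by simpa using hjn), hnm]
      simp [gA, PySem.List.enumerate_nil]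
    · have hrlen : 0 < rest.length := List.length_pos_iff.mpr hlast
      have hjn : ¬ ((j : Int) = (cs.length : Int) - 1) := by omega
      cases d with
      | true =>
        rcases hinv.mp rfl with ⟨h0, _, h3, hV1⟩
        have h3i : (3 : Int) ∣ (j : Int) := by exact_mod_cast h3
        have hnm : PySem.Set.contains (marksOf cs) (j : Int) = true := by
          rw [contains_marksOf, mem_marksOf]
          exact ⟨(j : Int) - 1, by omega, by omega, by omega,
            Or.inl ⟨hV1, by omega, by omega⟩⟩
        have ihh := ih (j + 1) false hrest (by
          constructor
          · intro h; exact absurd h (by simp)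
          · rintro ⟨_, _, hdvd, _⟩
            exfalso; omega)
        push_cast at ihh
        rw [gA, if_neg (by simpa using hjn), if_pos rfl, hnm, ihh]
        simp
      | false =>
        by_cases hm : PySem.Int.mod ((j : Int) + 1) 3 = 0
        · have hdvd : (3 : Int) ∣ (j : Int) + 1 := (PySem.Int.mod_eq_zero_iff_dvd _ _).mp hm
          by_cases hvc : pvVowels.contains c = true
          · have hnm : PySem.Set.contains (marksOf cs) (j : Int) = false := by
              rw [Bool.eq_false_iff, Ne, contains_marksOf, mem_marksOf]
              rintro ⟨p, h1, h2, h3, (⟨_, _, hx⟩ | ⟨hVf, hx⟩)⟩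
              · omega
              · rw [← hx, hVj] at hVf
                exact absurd (by simpa using hvc) (by simpa using hVf)
            have ihh := ih (j + 1) true hrest (by
              constructor
              · intro _
                refine ⟨by omega, by omega, by omega, ?_⟩
                have hc : ((j + 1 : Nat) : Int) - 1 = (j : Int) := by push_cast; ring
                rw [hc, hVj]; exact hvc
              · intro _; rfl)
            push_cast at ihh
            rw [gA, if_neg (by simpa using hjn), if_neg (by simp), if_pos (by simpa using hm),
              if_pos hvc, hnm, ihh]
            simp
          · have hvf : pvVowels.contains c = false := by
              simp only [Bool.not_eq_true] at hvc; exact hvc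
            have hnm : PySem.Set.contains (marksOf cs) (j : Int) = true := by
              rw [contains_marksOf, mem_marksOf]
              exact ⟨(j : Int), by omega, by omega, by omega,
                Or.inr ⟨by rw [hVj, hvf], rfl⟩⟩
            have ihh := ih (j + 1) false hrest (by
              constructor
              · intro h; exact absurd h (by simp)
              · rintro ⟨_, _, _, hVh⟩
                exfalso
                have hc : ((j + 1 : Nat) : Int) - 1 = (j : Int) := by push_cast; ring
                rw [hc, hVj, hvf] at hVh
                simp at hVh)
            push_cast at ihh
            rw [gA, if_neg (by simpa using hjn), if_neg (by simp), if_pos (by simpa using hm),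
              if_neg hvc, hnm, ihh]
            simp
        · have hndvd : ¬ ((3 : Int) ∣ (j : Int) + 1) := fun h =>
            hm ((PySem.Int.mod_eq_zero_iff_dvd _ _).mpr h)
          have hnm : PySem.Set.contains (marksOf cs) (j : Int) = false := by
            rw [Bool.eq_false_iff, Ne, contains_marksOf, mem_marksOf]
            rintro ⟨p, h1, h2, h3, (⟨hVt, hne, hx⟩ | ⟨_, hx⟩)⟩
            · have habs : (0 < j ∧ j < cs.length ∧ 3 ∣ j ∧ Vw cs ((j : Int) - 1) = true) := by
                refine ⟨by omega, hj, ?_, ?_⟩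
                · have h3i : (3 : Int) ∣ (j : Int) := by omega
                  exact_mod_cast h3i
                · have hp : p = (j : Int) - 1 := by omega
                  rw [hp] at hVt; exact hVt
              exact absurd (hinv.mpr habs) (by simp)
            · omega
          have ihh := ih (j + 1) false hrest (by
            constructor
            · intro h; exact absurd h (by simp)
            · rintro ⟨_, _, hdvd2, _⟩
              exfalso; omega)
          push_cast at ihh
          rw [gA, if_neg (by simpa using hjn), if_neg (by simp), if_neg (by simpa using hm),
            hnm, ihh]
          simp

-- ===== VERDICT (by name: the statement is the Claim_ definition above) =====
theorem process_spec : Claim_equal_process := by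
  intro txt _
  unfold Spec_process process process_alt
  rw [foldA]
  have h := mainA txt.toList txt.toList 0 false (by simp)
    (by constructor
        · intro h; simp at h
        · rintro ⟨h, _⟩; omega)
  push_cast at h
  simp only [List.nil_append]
  rw [h]
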